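-- pv_equiv track=rewrite | github.com/Mmaymer/stage_L3_janvier_AT | Validation/CourbesValidation.py | supprZeros
-- ===== SOURCE A (Python) =====
-- def supprZeros(resultsCC,resultsPB,resultsM,resultsLab):
--     notZerosIndex = [-1]*len(resultsLab)
--     Lab = [-1]*len(resultsLab)
--     CC = [-1]*len(resultsLab)
--     PB = [-1]*len(resultsLab)
--     M = [-1]*len(resultsLab)
--
--     notZerosIndex = [j for j in range(len(resultsLab)) if resultsLab[j] != 0]
--
--     Lab = [resultsLab[j] if j != -1 else -1 for j in notZerosIndex]
--     CC = [resultsCC[j] for j in notZerosIndex if j != -1]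
--     PB = [resultsPB[j] for j in notZerosIndex if j != -1]
--     M = [resultsM[j] for j in notZerosIndex if j != -1]
--
--     return CC, PB, M, Lab
-- ===== SOURCE B (Python) =====
-- def supprZeros(resultsCC, resultsPB, resultsM, resultsLab):
--     CC, PB, M, Lab = [], [], [], []
--     for j in range(len(resultsLab)):
--         if resultsLab[j] != 0:
--             CC.append(resultsCC[j])
--             PB.append(resultsPB[j])
--             M.append(resultsM[j])
--             Lab.append(resultsLab[j])
--     return CC, PB, M, Lab
-- ===== Notes on version B (the rewrite author's own statement) =====
-- stated objective: simpler
-- what changed: Replaces A's five throwaway initializations and four separate filtered comprehensions over a precomputed index list by one single fused loop that appends to the four output lists directly.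
import Mathlib
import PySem

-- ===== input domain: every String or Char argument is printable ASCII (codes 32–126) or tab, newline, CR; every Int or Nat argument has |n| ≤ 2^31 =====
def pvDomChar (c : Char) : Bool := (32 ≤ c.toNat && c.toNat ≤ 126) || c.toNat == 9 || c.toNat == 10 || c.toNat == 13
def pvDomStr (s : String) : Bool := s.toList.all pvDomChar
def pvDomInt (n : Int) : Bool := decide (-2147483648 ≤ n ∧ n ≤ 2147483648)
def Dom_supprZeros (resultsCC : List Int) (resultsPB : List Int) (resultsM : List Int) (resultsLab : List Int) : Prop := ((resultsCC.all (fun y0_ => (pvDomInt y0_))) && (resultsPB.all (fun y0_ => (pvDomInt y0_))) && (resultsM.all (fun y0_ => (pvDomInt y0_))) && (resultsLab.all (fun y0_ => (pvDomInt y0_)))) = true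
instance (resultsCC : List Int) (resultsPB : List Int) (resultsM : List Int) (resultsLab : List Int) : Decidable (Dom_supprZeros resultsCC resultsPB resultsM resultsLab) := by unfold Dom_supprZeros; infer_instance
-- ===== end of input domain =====

-- B replaces A's four separate filtered comprehensions over a precomputed index list
-- by one fused loop appending to the four output lists directly (objective: simpler).

-- ===== PORT A =====
def supprZeros (resultsCC : List Int) (resultsPB : List Int) (resultsM : List Int) (resultsLab : List Int) : List Int × List Int × List Int × List Int :=
  -- the initial '[-1]*len' assignments are dead (immediately overwritten); omitted
  let notZerosIndex : List Int :=
    (PySem.List.pyRange 0 resultsLab.length 1).filter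
      (fun j => PySem.List.pyGetD resultsLab j 0 ≠ 0)
  let Lab := notZerosIndex.map (fun j => if j ≠ -1 then PySem.List.pyGetD resultsLab j 0 else -1)
  let CC := (notZerosIndex.filter (fun j => j ≠ -1)).map (fun j => PySem.List.pyGetD resultsCC j 0)
  let PB := (notZerosIndex.filter (fun j => j ≠ -1)).map (fun j => PySem.List.pyGetD resultsPB j 0)
  let M := (notZerosIndex.filter (fun j => j ≠ -1)).map (fun j => PySem.List.pyGetD resultsM j 0)
  (CC, PB, M, Lab)

-- ===== PORT B =====
def supprZeros_alt (resultsCC : List Int) (resultsPB : List Int) (resultsM : List Int) (resultsLab : List Int) : List Int × List Int × List Int × List Int :=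
  (PySem.List.pyRange 0 resultsLab.length 1).foldl
    (fun (acc : List Int × List Int × List Int × List Int) j =>
      if PySem.List.pyGetD resultsLab j 0 ≠ 0 then
        (acc.1 ++ [PySem.List.pyGetD resultsCC j 0],
         acc.2.1 ++ [PySem.List.pyGetD resultsPB j 0],
         acc.2.2.1 ++ [PySem.List.pyGetD resultsM j 0],
         acc.2.2.2 ++ [PySem.List.pyGetD resultsLab j 0])
      else acc)
    ([], [], [], [])

-- ===== PRECONDITION & SPEC =====
-- Pre_ excludes exactly the inputs on which Python A raises IndexError: a nonzero label at
-- position j while one of the three companion lists is shorter than j+1.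
def Pre_supprZeros (resultsCC : List Int) (resultsPB : List Int) (resultsM : List Int) (resultsLab : List Int) : Prop :=
  ∀ j ∈ List.range resultsLab.length, resultsLab.getD j 0 ≠ 0 →
    j < resultsCC.length ∧ j < resultsPB.length ∧ j < resultsM.length
instance (resultsCC : List Int) (resultsPB : List Int) (resultsM : List Int) (resultsLab : List Int) : Decidable (Pre_supprZeros resultsCC resultsPB resultsM resultsLab) := by unfold Pre_supprZeros; infer_instance
def pvWitness_supprZeros : List Int × List Int × List Int × List Int := ([4, 5, 6], [7, 8, 9], [10, 11, 12], [0, 2, 0])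
def Spec_supprZeros (resultsCC : List Int) (resultsPB : List Int) (resultsM : List Int) (resultsLab : List Int) (out : List Int × List Int × List Int × List Int) : Prop := out = supprZeros_alt resultsCC resultsPB resultsM resultsLab
instance (resultsCC : List Int) (resultsPB : List Int) (resultsM : List Int) (resultsLab : List Int) (out : List Int × List Int × List Int × List Int) : Decidable (Spec_supprZeros resultsCC resultsPB resultsM resultsLab out) := by unfold Spec_supprZeros; infer_instance

-- ===== CLAIM (what is proved, stated in full; the proofs are below) =====
def Claim_equal_supprZeros : Prop := ∀ (resultsCC : List Int) (resultsPB : List Int) (resultsM : List Int) (resultsLab : List Int), Dom_supprZeros resultsCC resultsPB resultsM resultsLab → Pre_supprZeros resultsCC resultsPB resultsM resultsLab → Spec_supprZeros resultsCC resultsPB resultsM resultsLab (supprZeros resultsCC resultsPB resultsM resultsLab)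

-- ===== LEMMAS AND PROOFS =====

-- B's fused loop, run from any accumulator, appends the four filtered-map lists of A.
theorem foldl_four (resultsCC resultsPB resultsM resultsLab : List Int) (l : List Int)
    (acc : List Int × List Int × List Int × List Int) :
    l.foldl
      (fun (acc : List Int × List Int × List Int × List Int) j =>
        if PySem.List.pyGetD resultsLab j 0 ≠ 0 then
          (acc.1 ++ [PySem.List.pyGetD resultsCC j 0],
           acc.2.1 ++ [PySem.List.pyGetD resultsPB j 0],
           acc.2.2.1 ++ [PySem.List.pyGetD resultsM j 0],
           acc.2.2.2 ++ [PySem.List.pyGetD resultsLab j 0])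
        else acc) acc
    = (acc.1 ++ (l.filter (fun j => PySem.List.pyGetD resultsLab j 0 ≠ 0)).map (fun j => PySem.List.pyGetD resultsCC j 0),
       acc.2.1 ++ (l.filter (fun j => PySem.List.pyGetD resultsLab j 0 ≠ 0)).map (fun j => PySem.List.pyGetD resultsPB j 0),
       acc.2.2.1 ++ (l.filter (fun j => PySem.List.pyGetD resultsLab j 0 ≠ 0)).map (fun j => PySem.List.pyGetD resultsM j 0),
       acc.2.2.2 ++ (l.filter (fun j => PySem.List.pyGetD resultsLab j 0 ≠ 0)).map (fun j => PySem.List.pyGetD resultsLab j 0)) := by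
  induction l generalizing acc with
  | nil => simp
  | cons x xs ih =>
    by_cases h : PySem.List.pyGetD resultsLab x 0 ≠ 0
    · rw [List.foldl_cons, if_pos h, ih]
      simp [h]
    · rw [List.foldl_cons, if_neg h, ih]
      simp [h]

-- every index produced by the range filter is nonnegative, hence ≠ -1
theorem mem_idx_ne_neg_one (resultsLab : List Int) (j : Int)
    (h : j ∈ (PySem.List.pyRange 0 resultsLab.length 1).filter
      (fun j => PySem.List.pyGetD resultsLab j 0 ≠ 0)) : j ≠ -1 := by
  have hm := List.mem_of_mem_filter h
  have := (PySem.List.mem_pyRange_one).1 hm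
  omega

-- ===== VERDICT (by name: the statement is the Claim_ definition above) =====
theorem supprZeros_spec : Claim_equal_supprZeros := by
  intro resultsCC resultsPB resultsM resultsLab _ _
  unfold Spec_supprZeros supprZeros supprZeros_alt
  rw [foldl_four]
  set idx := (PySem.List.pyRange 0 resultsLab.length 1).filter
      (fun j => PySem.List.pyGetD resultsLab j 0 ≠ 0) with hidx
  have hne : ∀ j ∈ idx, j ≠ (-1 : Int) := fun j hj => mem_idx_ne_neg_one resultsLab j (hidx ▸ hj)
  have hf : idx.filter (fun j => !decide (j = -1)) = idx :=
    List.filter_eq_self.2 (fun j hj => by simp [hne j hj])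
  simp
  exact ⟨by rw [hf], by rw [hf], by rw [hf], fun a ha h => absurd h (hne a ha)⟩
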